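-- pv_equiv track=rewrite | github.com/suh-fee/nyuCoursework | Data Structures Labs/lab 5.py | product_evens
-- ===== SOURCE A (Python) =====
-- def product_evens(lst):
--     list1 = lst
--     max = len(list1)
--     sum = 1
--     if list1[0] != '':
--         if (list1[0] % 2 == 0) and (list1[0] <= max):
--             sum *= list1[0]
--         if len(list1) != 1:
--             new = list1[1:]
--             new.append('')
--             multipler = product_evens(new)
--         else:
--             multipler = 1
--         if multipler != None:
--             sum *= multipler
--     if sum == 1:
--         sum = None
--     del(list1)
--     return sum
-- ===== SOURCE B (Python) =====
-- def product_evens(lst):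
--     n = len(lst)
--     evens = [x for x in lst if x % 2 == 0 and x <= n]
--     if not evens:
--         return None
--     p = 1
--     for x in evens:
--         p *= x
--     return p
-- ===== Notes on version B (the rewrite author's own statement) =====
-- stated objective: simpler
-- what changed: A's sentinel-appending tail recursion (copying the tail and appending '' each level) is replaced by one filter of the qualifying evens plus a product loop, no recursion and no list rebuilding
import Mathlib
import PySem

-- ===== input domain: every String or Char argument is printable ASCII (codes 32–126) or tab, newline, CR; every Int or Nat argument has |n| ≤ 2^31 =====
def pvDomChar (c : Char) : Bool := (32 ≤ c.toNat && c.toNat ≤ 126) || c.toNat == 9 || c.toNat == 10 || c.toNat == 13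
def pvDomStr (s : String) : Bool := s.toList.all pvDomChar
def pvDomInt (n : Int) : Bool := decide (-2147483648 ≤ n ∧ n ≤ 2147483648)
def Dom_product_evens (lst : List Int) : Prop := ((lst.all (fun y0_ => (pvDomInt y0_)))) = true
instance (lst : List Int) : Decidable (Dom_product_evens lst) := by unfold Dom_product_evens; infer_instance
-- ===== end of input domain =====

-- B replaces A's sentinel-appending tail recursion by one filter + product loop; equivalence of RETURN values on nonempty lists (A raises IndexError on []).


-- ===== PORT A =====
-- A recurses on lst[1:] + [''] ; the mixed int/'' list is modelled as List (Option Int), '' = none.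
-- "if multipler != None: sum *= multipler" : multiply exactly when the recursive result is not None
def pvMulOpt (s : Int) (m : Option Int) : Int :=
  match m with
  | some v => s * v
  | none => s

-- The [] branch is where Python A raises IndexError (excluded by Pre_ at the entry; never reached in recursion).
def pvAuxA : List (Option Int) → Option Int
  | [] => none
  | some v :: t =>
      -- max = len(list1); list length is invariant along the recursion ('' is appended)
      let mx : Int := ((t.length + 1 : Nat) : Int)
      -- sum *= list1[0] when even and ≤ max
      let s1 : Int := if PySem.Int.mod v 2 = 0 ∧ v ≤ mx then v else 1
      -- if len(list1) != 1: recurse on list1[1:] + [''] else multipler = 1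
      let mult : Option Int := if t.length + 1 ≠ 1 then pvAuxA (t ++ [none]) else some 1
      -- if sum == 1: sum = None
      let s2 : Int := pvMulOpt s1 mult
      if s2 = 1 then none else some s2
  | none :: _ => none   -- list1[0] == '' : sum stays 1 -> None
termination_by l => l.countP (·.isSome)
decreasing_by simp [List.countP_append]

def product_evens (lst : List Int) : Option Int := pvAuxA (lst.map some)

-- ===== PORT B =====
def product_evens_alt (lst : List Int) : Option Int :=
  let n : Int := (lst.length : Int)
  let evens := lst.filter (fun x => decide (PySem.Int.mod x 2 = 0) && decide (x ≤ n))
  if evens.isEmpty then none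
  else some (evens.foldl (fun p x => p * x) 1)

-- ===== PRECONDITION & SPEC =====
-- Pre_ excludes only the empty list, on which A raises IndexError indexing the first element.
def Pre_product_evens (lst : List Int) : Prop := lst ≠ []
instance (lst : List Int) : Decidable (Pre_product_evens lst) := by unfold Pre_product_evens; infer_instance
def pvWitness_product_evens : List Int := ([2, 3, 4])

def Spec_product_evens (lst : List Int) (out : Option Int) : Prop := out = product_evens_alt lst
instance (lst : List Int) (out : Option Int) : Decidable (Spec_product_evens lst out) := by unfold Spec_product_evens; infer_instance

-- ===== CLAIM (what is proved, stated in full; the proofs are below) =====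
def Claim_equal_product_evens : Prop := ∀ (lst : List Int), Dom_product_evens lst → Pre_product_evens lst → Spec_product_evens lst (product_evens lst)

-- ===== LEMMAS AND PROOFS =====

-- the qualifying elements: even and ≤ L
def pvQual (L : Int) (xs : List Int) : List Int :=
  xs.filter (fun x => decide (PySem.Int.mod x 2 = 0) && decide (x ≤ L))

lemma pvQual_even {L : Int} {xs : List Int} {x : Int} (h : x ∈ pvQual L xs) : 2 ∣ x := by
  unfold pvQual at h
  have := List.of_mem_filter h
  simp only [Bool.and_eq_true, decide_eq_true_eq] at this
  exact (PySem.Int.mod_eq_zero_iff_dvd x 2).mp this.1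

lemma pvQual_prod_ne_one {L : Int} {xs : List Int} (h : pvQual L xs ≠ []) :
    (pvQual L xs).prod ≠ 1 := by
  obtain ⟨a, t, ht⟩ := List.exists_cons_of_ne_nil h
  have ha : 2 ∣ a := pvQual_even (by rw [ht]; exact List.mem_cons_self ..)
  have : 2 ∣ (pvQual L xs).prod := by
    rw [ht, List.prod_cons]; exact ha.mul_right _
  intro hc; rw [hc] at this; omega

lemma pvMulOpt_some (s m : Int) : pvMulOpt s (some m) = s * m := rfl
lemma pvMulOpt_none (s : Int) : pvMulOpt s none = s := rfl
lemma pvQual_nil (L : Int) : pvQual L [] = [] := rfl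

lemma pvAuxA_spec : ∀ (xs : List Int) (k : Nat),
    pvAuxA (xs.map some ++ List.replicate k none) =
      if pvQual ((xs.length + k : Nat) : Int) xs = [] then none
      else some (pvQual ((xs.length + k : Nat) : Int) xs).prod := by
  intro xs
  induction xs with
  | nil =>
      intro k
      cases k with
      | zero => simp [pvAuxA, pvQual]
      | succ k => simp [List.replicate_succ, pvAuxA, pvQual]
  | cons x xs ih =>
      intro k
      have hlen : (xs.map some ++ List.replicate k none).length = xs.length + k := by simp
      have happ : (xs.map some ++ List.replicate k none) ++ [none] =
          xs.map some ++ List.replicate (k + 1) none := by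
        rw [List.append_assoc, ← List.replicate_succ']
      set L : Int := (((x :: xs).length + k : Nat) : Int) with hLdef
      have hL : ((xs.length + (k + 1) : Nat) : Int) = L := by simp [hLdef]; omega
      have hmx : ((xs.length + k + 1 : Nat) : Int) = L := by simp [hLdef]; omega
      have hq : pvQual L (x :: xs) =
          if PySem.Int.mod x 2 = 0 ∧ x ≤ L then x :: pvQual L xs else pvQual L xs := by
        unfold pvQual
        simp only [List.filter_cons, Bool.and_eq_true, decide_eq_true_eq]
      simp only [List.map_cons, List.cons_append]
      rw [pvAuxA]
      simp only [hlen, hmx]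
      rw [hq]
      by_cases h0 : xs.length + k = 0
      · -- len(list1) == 1 : multipler = 1
        obtain ⟨hxs, hk⟩ : xs = [] ∧ k = 0 :=
          ⟨List.eq_nil_of_length_eq_zero (by omega), by omega⟩
        subst hxs; subst hk
        rw [if_neg (by simp : ¬ (([] : List Int).length + 0 + 1 ≠ 1)), pvMulOpt_some, mul_one]
        by_cases hc : PySem.Int.mod x 2 = 0 ∧ x ≤ L
        · have hx2 : 2 ∣ x := (PySem.Int.mod_eq_zero_iff_dvd x 2).mp hc.1
          rw [if_pos hc, if_pos hc, if_neg (by omega : ¬ (x = 1)), pvQual_nil,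
            if_neg (by simp : ¬ ([x] = ([] : List Int)))]
          simp only [List.prod_cons, List.prod_nil, mul_one]
        · rw [if_neg hc, if_neg hc, if_pos rfl, pvQual_nil, if_pos rfl]
      · -- len(list1) != 1 : recurse
        rw [if_pos (by omega : xs.length + k + 1 ≠ 1), happ, ih (k + 1), hL]
        by_cases hq' : pvQual L xs = []
        · rw [if_pos hq', pvMulOpt_none]
          by_cases hc : PySem.Int.mod x 2 = 0 ∧ x ≤ L
          · have hx2 : 2 ∣ x := (PySem.Int.mod_eq_zero_iff_dvd x 2).mp hc.1
            rw [if_pos hc, if_pos hc, if_neg (by omega : ¬ (x = 1)), hq',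
              if_neg (by simp : ¬ ([x] = ([] : List Int)))]
            simp only [List.prod_cons, List.prod_nil, mul_one]
          · rw [if_neg hc, if_neg hc, if_pos rfl, if_pos hq']
        · rw [if_neg hq', pvMulOpt_some]
          by_cases hc : PySem.Int.mod x 2 = 0 ∧ x ≤ L
          · have hx2 : 2 ∣ x := (PySem.Int.mod_eq_zero_iff_dvd x 2).mp hc.1
            have hne : x * (pvQual L xs).prod ≠ 1 := by
              have : 2 ∣ x * (pvQual L xs).prod := hx2.mul_right _
              omega
            rw [if_pos hc, if_pos hc, if_neg hne,
              if_neg (List.cons_ne_nil x (pvQual L xs))]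
            simp only [List.prod_cons]
          · rw [if_neg hc, if_neg hc, one_mul, if_neg (pvQual_prod_ne_one hq'), if_neg hq']

lemma foldl_mul_eq_prod (l : List Int) : l.foldl (fun p x => p * x) 1 = l.prod := by
  rw [List.prod_eq_foldl]

-- ===== VERDICT (by name: the statement is the Claim_ definition above) =====
theorem product_evens_spec : Claim_equal_product_evens := by
  intro lst _ hpre
  unfold Spec_product_evens product_evens product_evens_alt
  have h := pvAuxA_spec lst 0
  simp only [List.replicate_zero, List.append_nil, Nat.add_zero] at h
  rw [h]
  simp only [List.isEmpty_iff, foldl_mul_eq_prod]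
  rfl
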